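-- pv_equiv track=rewrite | github.com/PPM26/ptvn-data-validator | app/utils/spec_parser.py | clean_missing_values
-- ===== SOURCE A (Python) =====
-- def fix_spec_format(spec_string: str) -> str:
--     """Remove internal spaces from keys and values while preserving key-value separation
--        Convert to lowercase"""
--     if not spec_string:
--         return spec_string
--
--     pairs = spec_string.split("|")
--     fixed_pairs = []
--
--     for pair in pairs:
--         parts = pair.strip().split(" ", 1)  # Split only on first space
--         if len(parts) == 2:
--             key = parts[0].replace(" ", "").lower()
--             value = parts[1].replace(" ", "").lower()
--             fixed_pairs.append(f"{key} {value}")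
--
--     return "|".join(fixed_pairs)
--
-- def clean_missing_values(spec_string: str) -> str:
--     """
--     Replace any '?' value with '-' AFTER final normalization.
--     """
--     normalized = fix_spec_format(spec_string or "")
--
--     if not normalized:
--         return normalized
--
--     parts = normalized.split("|")
--     out = []
--
--     for part in parts:
--         part = part.strip()
--         if not part:
--             continue
--
--         key_value = part.split(" ", 1)
--         if len(key_value) != 2:
--             continue
--
--         key, value = key_value
--
--         if value == "?":
--             value = "-"
--
--         out.append(f"{key} {value}")
--
--     return "|".join(out)
-- ===== SOURCE B (Python) =====
-- def clean_missing_values(spec_string: str) -> str: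
--     """Single-pass: normalize each pair and fix '?' values in one traversal."""
--     if not spec_string:
--         return spec_string
--     out = []
--     for pair in spec_string.split("|"):
--         parts = pair.strip().split(" ", 1)
--         if len(parts) != 2:
--             continue
--         key = parts[0].replace(" ", "").lower()
--         value = parts[1].replace(" ", "").lower()
--         if value == "?":
--             value = "-"
--         out.append(f"{key} {value}")
--     return "|".join(out)
-- ===== Notes on version B (the rewrite author's own statement) =====
-- stated objective: simpler
-- what changed: B fuses A's two passes (normalize via fix_spec_format, then re-split the joined result to replace '?') into one traversal that splits the input once and emits each normalized pair with the '?'->'-' fix applied directly, removing the helper, the intermediate joined string and its re-parsing.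
import Mathlib
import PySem

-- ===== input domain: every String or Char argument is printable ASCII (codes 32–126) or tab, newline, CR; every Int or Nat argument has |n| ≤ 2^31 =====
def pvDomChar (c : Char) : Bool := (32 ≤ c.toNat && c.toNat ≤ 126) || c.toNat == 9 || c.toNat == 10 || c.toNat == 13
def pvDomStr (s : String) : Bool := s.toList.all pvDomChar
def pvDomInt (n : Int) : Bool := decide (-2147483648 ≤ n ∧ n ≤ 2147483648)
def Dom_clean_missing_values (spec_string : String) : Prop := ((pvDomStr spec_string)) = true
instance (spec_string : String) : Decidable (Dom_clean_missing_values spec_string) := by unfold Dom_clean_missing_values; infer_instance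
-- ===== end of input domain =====

-- B fuses A's two passes (normalize via fix_spec_format, then re-parse the joined result to
-- replace '?') into one traversal of the input; objective: simpler.

-- ===== PORT A =====
def fix_spec_format_chars (s : List Char) : List Char :=
  if s.isEmpty then s
  else
    let pairs := PySem.Chars.splitOn s ['|']
    let fixed_pairs := pairs.foldl (fun acc pair =>
      let parts := PySem.Chars.splitOnMax (PySem.Chars.strip pair) [' '] 1
      if parts.length = 2 then
        acc ++ [PySem.Chars.lower (PySem.Chars.replace (parts[0]!) [' '] []) ++
                ' ' :: PySem.Chars.lower (PySem.Chars.replace (parts[1]!) [' '] [])]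
      else acc) []
    PySem.Chars.join ['|'] fixed_pairs

def clean_missing_values_chars (s : List Char) : List Char :=
  let normalized := fix_spec_format_chars s
  if normalized.isEmpty then normalized
  else
    let parts := PySem.Chars.splitOn normalized ['|']
    let out := parts.foldl (fun acc part0 =>
      let part := PySem.Chars.strip part0
      if part.isEmpty then acc
      else
        let key_value := PySem.Chars.splitOnMax part [' '] 1
        if key_value.length ≠ 2 then acc
        else
          let key := key_value[0]!
          let value := key_value[1]!
          let value := if value = ['?'] then ['-'] else value
          acc ++ [key ++ ' ' :: value]) []
    PySem.Chars.join ['|'] out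

def clean_missing_values (spec_string : String) : String :=
  String.ofList (clean_missing_values_chars spec_string.toList)

-- ===== PORT B =====
def clean_missing_values_alt_chars (s : List Char) : List Char :=
  if s.isEmpty then s
  else
    PySem.Chars.join ['|'] ((PySem.Chars.splitOn s ['|']).foldl (fun acc pair =>
      let parts := PySem.Chars.splitOnMax (PySem.Chars.strip pair) [' '] 1
      if parts.length = 2 then
        let key := PySem.Chars.lower (PySem.Chars.replace (parts[0]!) [' '] [])
        let value0 := PySem.Chars.lower (PySem.Chars.replace (parts[1]!) [' '] [])
        let value := if value0 = ['?'] then ['-'] else value0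
        acc ++ [key ++ ' ' :: value]
      else acc) [])


def clean_missing_values_alt (spec_string : String) : String :=
  String.ofList (clean_missing_values_alt_chars spec_string.toList)

-- ===== PRECONDITION & SPEC =====
def Spec_clean_missing_values (spec_string : String) (out : String) : Prop := out = clean_missing_values_alt spec_string
instance (spec_string : String) (out : String) : Decidable (Spec_clean_missing_values spec_string out) := by unfold Spec_clean_missing_values; infer_instance

-- ===== CLAIM (what is proved, stated in full; the proofs are below) =====
def Claim_equal_clean_missing_values : Prop := ∀ (spec_string : String), Dom_clean_missing_values spec_string → Spec_clean_missing_values spec_string (clean_missing_values spec_string)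

-- ===== LEMMAS AND PROOFS =====

lemma pv_replace_go_space (fuel : Nat) : ∀ (l acc : List Char), l.length ≤ fuel →
    PySem.Chars.replace.go [' '] [] fuel l acc = acc.reverse ++ l.filter (· ≠ ' ') := by
  induction fuel with
  | zero =>
    intro l acc h
    have : l = [] := by cases l <;> simp_all
    subst this
    simp [PySem.Chars.replace.go]
  | succ n ih =>
    intro l acc h
    cases l with
    | nil => simp [PySem.Chars.replace.go]
    | cons c t =>
      by_cases hc : c = ' '
      · subst hc
        have hp : List.isPrefixOf [' '] (' ' :: t) = true := by simp [List.isPrefixOf]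
        rw [PySem.Chars.replace.go]
        simp only [hp, if_true, List.length_cons, List.length_nil, Nat.zero_add,
          List.drop_succ_cons, List.drop_zero, List.reverse_nil, List.nil_append]
        rw [ih t acc (by simp at h; omega)]
        simp
      · have hp : List.isPrefixOf [' '] (c :: t) = false := by
          simp [List.isPrefixOf]; exact fun h' => hc h'.symm
        rw [PySem.Chars.replace.go]
        simp only [hp, Bool.false_eq_true, if_false]
        rw [ih t (c :: acc) (by simp at h; omega)]
        simp [hc]

lemma pv_replace_space (s : List Char) :
    PySem.Chars.replace s [' '] [] = s.filter (· ≠ ' ') := by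
  rw [PySem.Chars.replace]
  simp only [List.isEmpty_cons, if_false, Bool.false_eq_true]
  rw [pv_replace_go_space s.length s [] (by omega)]
  simp

lemma pv_splitOn_go (c : Char) (fuel : Nat) : ∀ (l cur : List Char) (acc : List (List Char)),
    l.length < fuel →
    PySem.Chars.splitOn.go [c] fuel l cur acc =
      acc.reverse ++ (l.splitOn c).modifyHead (cur.reverse ++ ·) := by
  induction fuel with
  | zero => intro l cur acc h; omega
  | succ n ih =>
    intro l cur acc h
    cases l with
    | nil => simp [PySem.Chars.splitOn.go, List.splitOn]
    | cons x t =>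
      by_cases hx : x = c
      · subst hx
        have hp : List.isPrefixOf [x] (x :: t) = true := by simp [List.isPrefixOf]
        rw [PySem.Chars.splitOn.go]
        simp only [hp, if_true, List.length_cons, List.length_nil, Nat.zero_add,
          List.drop_succ_cons, List.drop_zero]
        rw [ih t [] (cur.reverse :: acc) (by simp at h; omega)]
        simp only [List.splitOn, List.splitOnP_cons, beq_self_eq_true, if_true,
          List.modifyHead_cons, List.reverse_cons, List.nil_append, List.append_assoc]
        cases List.splitOnP (fun x_1 => x_1 == x) t <;> simp
      · have hp : List.isPrefixOf [c] (x :: t) = false := by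
          simp [List.isPrefixOf]; exact fun h' => hx h'.symm
        rw [PySem.Chars.splitOn.go]
        simp only [hp, Bool.false_eq_true, if_false]
        rw [ih t (x :: cur) acc (by simp at h; omega)]
        simp only [List.splitOn, List.splitOnP_cons, hx, if_false, beq_iff_eq,
          Bool.false_eq_true]
        congr 1
        cases hsp : List.splitOnP (· == c) t with
        | nil => simp
        | cons y ys =>
          simp only [List.modifyHead_cons, List.reverse_cons, List.append_assoc,
            List.singleton_append]

lemma pv_splitOn_single (c : Char) (s : List Char) :
    PySem.Chars.splitOn s [c] = s.splitOn c := by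
  rw [PySem.Chars.splitOn, pv_splitOn_go c (s.length + 1) s [] [] (by omega)]
  cases h : s.splitOn c with
  | nil => simp
  | cons y ys => simp

lemma pv_splitOnMax_go_zero (fuel : Nat) (l cur : List Char) (acc : List (List Char)) :
    PySem.Chars.splitOnMax.go [' '] fuel 0 l cur acc =
      acc.reverse ++ [cur.reverse ++ l] := by
  cases fuel with
  | zero => simp [PySem.Chars.splitOnMax.go]
  | succ n =>
    cases l with
    | nil => simp [PySem.Chars.splitOnMax.go]
    | cons x t => rw [PySem.Chars.splitOnMax.go]; simp

lemma pv_splitOnMax_go_one (fuel : Nat) : ∀ (l cur : List Char) (acc : List (List Char)),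
    l.length < fuel →
    PySem.Chars.splitOnMax.go [' '] fuel 1 l cur acc =
      acc.reverse ++ (if ' ' ∈ l then
        [cur.reverse ++ l.takeWhile (· ≠ ' '), (l.dropWhile (· ≠ ' ')).tail]
      else [cur.reverse ++ l]) := by
  induction fuel with
  | zero => intro l cur acc h; omega
  | succ n ih =>
    intro l cur acc h
    cases l with
    | nil => simp [PySem.Chars.splitOnMax.go]
    | cons x t =>
      by_cases hx : x = ' '
      · subst hx
        have hp : List.isPrefixOf [' '] (' ' :: t) = true := by simp [List.isPrefixOf]
        rw [PySem.Chars.splitOnMax.go]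
        simp only [hp, if_true, one_ne_zero, if_false, List.length_cons, List.length_nil,
          Nat.zero_add, List.drop_succ_cons, List.drop_zero]
        rw [pv_splitOnMax_go_zero]
        simp [List.takeWhile_cons, List.dropWhile_cons]
      · have hp : List.isPrefixOf [' '] (x :: t) = false := by
          simp [List.isPrefixOf]; exact fun h' => hx h'.symm
        rw [PySem.Chars.splitOnMax.go]
        simp only [hp, one_ne_zero, if_false, Bool.false_eq_true]
        rw [ih t (x :: cur) acc (by simp at h; omega)]
        have hxs : ¬ (' ' : Char) = x := fun h' => hx h'.symm
        simp only [List.mem_cons, hxs, false_or]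
        by_cases hm : ' ' ∈ t
        · simp only [hm, if_true, List.takeWhile_cons, List.dropWhile_cons, decide_not,
            decide_eq_true_eq, hx, decide_false, Bool.not_false, if_true,
            List.reverse_cons, List.append_assoc, List.singleton_append]
        · simp only [hm, if_false, List.reverse_cons, List.append_assoc,
            List.singleton_append]

lemma pv_splitOnMax_space_one (s : List Char) :
    PySem.Chars.splitOnMax s [' '] 1 =
      if ' ' ∈ s then [s.takeWhile (· ≠ ' '), (s.dropWhile (· ≠ ' ')).tail] else [s] := by
  rw [PySem.Chars.splitOnMax]
  norm_num
  rw [pv_splitOnMax_go_one (s.length + 1) s [] [] (by omega)]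
  split <;> simp

lemma pv_dropWhile_head_false {p : Char → Bool} {l : List Char} (h : l ≠ [])
    (hh : p (l.head h) = false) : l.dropWhile p = l := by
  cases l with
  | nil => simp at h
  | cons x t => simp_all [List.dropWhile_cons]

lemma pv_strip_id (a b : Char) (k : List Char)
    (ha : PySem.Chars.isspace a = false) (hb : PySem.Chars.isspace b = false) :
    PySem.Chars.strip (a :: k ++ [b]) = a :: k ++ [b] := by
  have h1 : PySem.Chars.lstrip (a :: k ++ [b]) = a :: k ++ [b] := by
    unfold PySem.Chars.lstrip
    exact pv_dropWhile_head_false (by simp) (by simpa using ha)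
  unfold PySem.Chars.strip PySem.Chars.rstrip
  rw [h1]
  rw [pv_dropWhile_head_false (l := (a :: k ++ [b]).reverse) (by simp) (by simpa using hb)]
  simp

-- head and last of a nonempty stripped string are non-space
lemma pv_strip_head (p : List Char) (h : PySem.Chars.strip p ≠ []) :
    PySem.Chars.isspace ((PySem.Chars.strip p).head h) = false := by
  unfold PySem.Chars.strip PySem.Chars.rstrip PySem.Chars.lstrip at *
  set m := List.dropWhile PySem.Chars.isspace p with hm
  have hm' : m ≠ [] := by
    intro he; rw [he] at h; simp at h
  -- the head of the stripped list is the head of m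
  have hsub : (List.dropWhile PySem.Chars.isspace m.reverse).reverse <+: m := by
    have : List.dropWhile PySem.Chars.isspace m.reverse <:+ m.reverse :=
      List.dropWhile_suffix _
    obtain ⟨t, ht⟩ := this
    exact ⟨t.reverse, by rw [← List.reverse_append, ht, List.reverse_reverse]⟩
  rw [List.IsPrefix.head hsub h]
  exact List.head_dropWhile_not _ hm'

lemma pv_strip_last (p : List Char) (h : PySem.Chars.strip p ≠ []) :
    PySem.Chars.isspace ((PySem.Chars.strip p).getLast h) = false := by
  unfold PySem.Chars.strip PySem.Chars.rstrip at *
  set m := (PySem.Chars.lstrip p).reverse with hm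
  have hd : List.dropWhile PySem.Chars.isspace m ≠ [] := by
    intro he; rw [he] at h; simp at h
  rw [List.getLast_reverse]
  exact List.head_dropWhile_not _ hd

lemma pv_upper_bounds (c : Char) (h : PySem.Chars.isupper c = true) :
    65 ≤ c.toNat ∧ c.toNat ≤ 90 := by
  simp [PySem.Chars.isupper, Char.le_def, UInt32.le_iff_toNat_le] at h
  exact ⟨h.1, h.2⟩

lemma pv_lowerChar_toNat (c : Char) (h : PySem.Chars.isupper c = true) :
    (PySem.Chars.lowerChar c).toNat = c.toNat + 32 := by
  have hb := pv_upper_bounds c h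
  simp only [PySem.Chars.lowerChar, h, if_true]
  rw [Char.toNat_ofNat]
  have hv : (c.toNat + 32).isValidChar := by unfold Nat.isValidChar; omega
  simp [hv]

lemma pv_isspace_toNat (c : Char) :
    PySem.Chars.isspace c = true ↔ (c.toNat = 32 ∨ (9 ≤ c.toNat ∧ c.toNat ≤ 13) ∨
      (28 ≤ c.toNat ∧ c.toNat ≤ 31) ∨ c.toNat = 133 ∨ c.toNat = 160 ∨ c.toNat = 5760 ∨
      (8192 ≤ c.toNat ∧ c.toNat ≤ 8202) ∨ c.toNat = 8232 ∨ c.toNat = 8233 ∨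
      c.toNat = 8239 ∨ c.toNat = 8287 ∨ c.toNat = 12288) := by
  simp [PySem.Chars.isspace]
  tauto

lemma pv_isspace_lowerChar (c : Char) :
    PySem.Chars.isspace (PySem.Chars.lowerChar c) = PySem.Chars.isspace c := by
  by_cases h : PySem.Chars.isupper c = true
  · have hb := pv_upper_bounds c h
    have ht := pv_lowerChar_toNat c h
    have h1 : PySem.Chars.isspace (PySem.Chars.lowerChar c) = false := by
      rw [Bool.eq_false_iff]; intro hs
      have := (pv_isspace_toNat _).mp hs
      omega
    have h2 : PySem.Chars.isspace c = false := by
      rw [Bool.eq_false_iff]; intro hs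
      have := (pv_isspace_toNat _).mp hs
      omega
    rw [h1, h2]
  · simp [PySem.Chars.lowerChar, h]

lemma pv_lowerChar_eq (c d : Char) (hd : ¬ (97 ≤ d.toNat ∧ d.toNat ≤ 122))
    (h : PySem.Chars.lowerChar c = d) : c = d := by
  by_cases hu : PySem.Chars.isupper c = true
  · exfalso
    have hb := pv_upper_bounds c hu
    have ht := pv_lowerChar_toNat c hu
    rw [h] at ht
    omega
  · simpa [PySem.Chars.lowerChar, hu] using h

lemma pv_isspace_space : PySem.Chars.isspace ' ' = true := by decide

def pvCond (pair : List Char) : Bool :=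
  (PySem.Chars.splitOnMax (PySem.Chars.strip pair) [' '] 1).length = 2

def pvNorm (pair : List Char) : List Char :=
  let parts := PySem.Chars.splitOnMax (PySem.Chars.strip pair) [' '] 1
  PySem.Chars.lower (PySem.Chars.replace (parts[0]!) [' '] []) ++
    ' ' :: PySem.Chars.lower (PySem.Chars.replace (parts[1]!) [' '] [])

def pvNormQ (pair : List Char) : List Char :=
  let parts := PySem.Chars.splitOnMax (PySem.Chars.strip pair) [' '] 1
  let key := PySem.Chars.lower (PySem.Chars.replace (parts[0]!) [' '] [])
  let value0 := PySem.Chars.lower (PySem.Chars.replace (parts[1]!) [' '] [])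
  key ++ ' ' :: (if value0 = ['?'] then ['-'] else value0)

def pvQ (e : List Char) : List Char :=
  let k := e.takeWhile (· ≠ ' ')
  let v := (e.dropWhile (· ≠ ' ')).tail
  k ++ ' ' :: (if v = ['?'] then ['-'] else v)

def pvGood (e : List Char) : Prop :=
  ∃ (a b : Char) (k w : List Char), e = (a :: k) ++ ' ' :: (w ++ [b]) ∧
    PySem.Chars.isspace a = false ∧ PySem.Chars.isspace b = false ∧
    ' ' ∉ (a :: k) ∧ ' ' ∉ (w ++ [b])

lemma pv_take_drop_split (k v : List Char) (hk : ' ' ∉ k) :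
    (k ++ ' ' :: v).takeWhile (· ≠ ' ') = k ∧
    (k ++ ' ' :: v).dropWhile (· ≠ ' ') = ' ' :: v := by
  induction k with
  | nil => simp [List.takeWhile_cons, List.dropWhile_cons]
  | cons x t ih =>
    have hx : x ≠ ' ' := fun h => hk (by simp [h])
    have ht : ' ' ∉ t := fun h => hk (by simp [h])
    obtain ⟨h1, h2⟩ := ih ht
    simp only [decide_not] at h1 h2
    constructor
    · simp [List.takeWhile_cons, hx, h1]
    · simp [hx, h2]

lemma pv_mem_strip (p : List Char) (x : Char) (hx : x ∈ PySem.Chars.strip p) : x ∈ p := by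
  unfold PySem.Chars.strip PySem.Chars.rstrip PySem.Chars.lstrip at hx
  rw [List.mem_reverse] at hx
  have h1 := (List.dropWhile_sublist (p := PySem.Chars.isspace)
    (l := (List.dropWhile PySem.Chars.isspace p).reverse)).mem hx
  rw [List.mem_reverse] at h1
  exact (List.dropWhile_sublist (p := PySem.Chars.isspace) (l := p)).mem h1

lemma pv_strip_head' (p : List Char) (a : Char) (t : List Char)
    (h : PySem.Chars.strip p = a :: t) : PySem.Chars.isspace a = false := by
  have hne : PySem.Chars.strip p ≠ [] := by simp [h]
  have hh := pv_strip_head p hne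
  simp only [h, List.head_cons] at hh
  exact hh

lemma pv_strip_last' (p : List Char) (w : List Char) (b : Char)
    (h : PySem.Chars.strip p = w ++ [b]) : PySem.Chars.isspace b = false := by
  have hne : PySem.Chars.strip p ≠ [] := by simp [h]
  have hl := pv_strip_last p hne
  simp only [h, List.getLast_append] at hl
  exact hl

lemma pv_pair_main (p : List Char) (hc : pvCond p = true) :
    ∃ (a b : Char) (k w : List Char),
      PySem.Chars.splitOnMax (PySem.Chars.strip p) [' '] 1 = [a :: k, w ++ [b]] ∧
      PySem.Chars.isspace a = false ∧ PySem.Chars.isspace b = false ∧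
      ' ' ∉ (a :: k) ∧ (a :: k) ++ ' ' :: (w ++ [b]) = PySem.Chars.strip p := by
  unfold pvCond at hc
  rw [pv_splitOnMax_space_one] at hc
  by_cases hm : ' ' ∈ PySem.Chars.strip p
  case neg => rw [if_neg hm] at hc; simp at hc
  set sp := PySem.Chars.strip p with hsp
  have hd : sp.dropWhile (· ≠ ' ') ≠ [] := by
    intro h
    rw [List.dropWhile_eq_nil_iff] at h
    have := h ' ' hm
    simp at this
  obtain ⟨y, v0, hdc⟩ : ∃ y v0, sp.dropWhile (· ≠ ' ') = y :: v0 := by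
    cases hdc : sp.dropWhile (· ≠ ' ') with
    | nil => exact absurd hdc hd
    | cons y v0 => exact ⟨y, v0, rfl⟩
  have hy : y = ' ' := by
    have hw := List.head_dropWhile_not (fun x => decide (x ≠ ' ')) hd
    have hhead : (sp.dropWhile (· ≠ ' ')).head hd = y := by
      simp only [decide_not] at hdc ⊢
      simp [hdc]
    rw [hhead] at hw
    simpa using hw
  subst hy
  have hsplit : sp.takeWhile (· ≠ ' ') ++ ' ' :: v0 = sp := by
    rw [← hdc]; exact List.takeWhile_append_dropWhile
  obtain ⟨a, k, hk2⟩ : ∃ a k, sp.takeWhile (· ≠ ' ') = a :: k := by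
    cases hkc : sp.takeWhile (· ≠ ' ') with
    | nil =>
      exfalso
      rw [hkc, List.nil_append] at hsplit
      have := pv_strip_head' p ' ' v0 hsplit.symm
      rw [pv_isspace_space] at this
      exact absurd this (by simp)
    | cons a k => exact ⟨a, k, rfl⟩
  have hka : PySem.Chars.isspace a = false := by
    apply pv_strip_head' p a (k ++ ' ' :: v0)
    rw [← hsp, ← hsplit, hk2]
    rfl
  obtain ⟨w, b, hv2⟩ : ∃ w b, v0 = w ++ [b] := by
    cases hvc : v0 with
    | nil =>
      exfalso
      rw [hvc] at hsplit
      have := pv_strip_last' p (sp.takeWhile (· ≠ ' ')) ' ' hsplit.symm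
      rw [pv_isspace_space] at this
      exact absurd this (by simp)
    | cons c w =>
      exact ⟨(c :: w).dropLast, (c :: w).getLast (by simp),
        (List.dropLast_append_getLast (by simp)).symm⟩
  have hvb : PySem.Chars.isspace b = false := by
    apply pv_strip_last' p (a :: k ++ ' ' :: w) b
    rw [← hsp, ← hsplit, hk2, hv2]
    simp
  have hksp : ' ' ∉ (a :: k) := by
    rw [← hk2]
    intro hmem
    have := List.mem_takeWhile_imp hmem
    simp at this
  refine ⟨a, b, k, w, ?_, hka, hvb, hksp, ?_⟩
  · rw [pv_splitOnMax_space_one]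
    simp only [hm, if_true]
    rw [hk2, hdc, hv2]
    simp
  · rw [← hv2, ← hk2]; exact hsplit

lemma pv_space_toNat : (' ' : Char).toNat = 32 := by decide

lemma pv_norm_good_q (p : List Char) (hc : pvCond p = true) :
    pvGood (pvNorm p) ∧ pvQ (pvNorm p) = pvNormQ p := by
  obtain ⟨a, b, k, w, hsplit, ha, hb, hk, hsp⟩ := pv_pair_main p hc
  have hbne : b ≠ ' ' := by
    intro he; rw [he, pv_isspace_space] at hb; simp at hb
  have hrep1 : PySem.Chars.replace (a :: k) [' '] [] = a :: k := by
    rw [pv_replace_space]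
    apply List.filter_eq_self.mpr
    intro x hx
    simp only [decide_eq_true_eq]
    intro he
    exact hk (he ▸ hx)
  have hrep2 : PySem.Chars.replace (w ++ [b]) [' '] [] =
      w.filter (· ≠ ' ') ++ [b] := by
    rw [pv_replace_space, List.filter_append]
    simp [hbne]
  have hN : pvNorm p =
      (PySem.Chars.lowerChar a :: k.map PySem.Chars.lowerChar) ++ ' ' ::
        ((w.filter (· ≠ ' ')).map PySem.Chars.lowerChar ++ [PySem.Chars.lowerChar b]) := by
    unfold pvNorm
    rw [hsplit]
    simp [hrep1, hrep2, PySem.Chars.lower]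
  have hka' : PySem.Chars.isspace (PySem.Chars.lowerChar a) = false := by
    rw [pv_isspace_lowerChar]; exact ha
  have hkb' : PySem.Chars.isspace (PySem.Chars.lowerChar b) = false := by
    rw [pv_isspace_lowerChar]; exact hb
  have hknosp : ' ' ∉ PySem.Chars.lowerChar a :: k.map PySem.Chars.lowerChar := by
    intro hmem
    rcases List.mem_cons.mp hmem with h1 | h1
    · have : a = ' ' := pv_lowerChar_eq a ' ' (by rw [pv_space_toNat]; omega) h1.symm
      exact hk (by simp [this])
    · obtain ⟨d, hd, hde⟩ := List.mem_map.mp h1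
      have : d = ' ' := pv_lowerChar_eq d ' ' (by rw [pv_space_toNat]; omega) hde
      subst this
      exact hk (List.mem_cons_of_mem _ hd)
  have hvnosp : ' ' ∉ (w.filter (· ≠ ' ')).map PySem.Chars.lowerChar ++
      [PySem.Chars.lowerChar b] := by
    intro hmem
    rcases List.mem_append.mp hmem with h1 | h1
    · obtain ⟨d, hd, hde⟩ := List.mem_map.mp h1
      have hds : d = ' ' := pv_lowerChar_eq d ' ' (by rw [pv_space_toNat]; omega) hde
      have := List.of_mem_filter hd
      simp [hds] at this
    · simp at h1
      have : b = ' ' := pv_lowerChar_eq b ' ' (by rw [pv_space_toNat]; omega) h1.symm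
      exact hbne this
  constructor
  · exact ⟨PySem.Chars.lowerChar a, PySem.Chars.lowerChar b,
      k.map PySem.Chars.lowerChar, (w.filter (· ≠ ' ')).map PySem.Chars.lowerChar,
      hN, hka', hkb', hknosp, hvnosp⟩
  · obtain ⟨ht, hdr⟩ := pv_take_drop_split
      (PySem.Chars.lowerChar a :: k.map PySem.Chars.lowerChar)
      ((w.filter (· ≠ ' ')).map PySem.Chars.lowerChar ++ [PySem.Chars.lowerChar b]) hknosp
    unfold pvQ pvNormQ
    rw [hN, ht, hdr, hsplit]
    simp only [List.tail_cons]
    simp [hrep1, hrep2, PySem.Chars.lower]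

lemma pv_splitOnP_not_mem (c : Char) (xs : List Char) :
    ∀ l ∈ List.splitOnP (· == c) xs, c ∉ l := by
  induction xs with
  | nil =>
    intro l hl
    rw [List.splitOnP_nil] at hl
    simp at hl
    subst hl
    simp
  | cons x t ih =>
    intro l hl
    rw [List.splitOnP_cons] at hl
    by_cases hx : x = c
    · simp only [hx, beq_self_eq_true, if_true] at hl
      rcases List.mem_cons.mp hl with h | h
      · subst h; simp
      · exact ih l h
    · simp only [beq_iff_eq, hx, if_false] at hl
      cases hsp : List.splitOnP (· == c) t with
      | nil =>
        rw [hsp] at hl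
        simp at hl
      | cons y ys =>
        rw [hsp] at hl
        simp only [List.modifyHead_cons] at hl
        rcases List.mem_cons.mp hl with h | h
        · subst h
          intro hmem
          rcases List.mem_cons.mp hmem with h1 | h1
          · exact hx h1.symm
          · exact ih y (by rw [hsp]; exact List.mem_cons_self) h1
        · exact ih l (by rw [hsp]; exact List.mem_cons_of_mem _ h)

lemma pv_pipe_not_mem_split (s p : List Char)
    (hp : p ∈ PySem.Chars.splitOn s ['|']) : '|' ∉ p := by
  rw [pv_splitOn_single] at hp
  rw [List.splitOn] at hp
  exact pv_splitOnP_not_mem '|' s p hp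

lemma pv_pipe_toNat : ('|' : Char).toNat = 124 := by decide

lemma pv_pipe_not_mem_norm (p : List Char) (hc : pvCond p = true) (hp : '|' ∉ p) :
    '|' ∉ pvNorm p := by
  obtain ⟨a, b, k, w, hsplit, ha, hb, hk, hsp⟩ := pv_pair_main p hc
  intro hmem
  unfold pvNorm at hmem
  rw [hsplit] at hmem
  simp only [List.getElem!_cons_zero, List.getElem!_cons_succ, pv_replace_space,
    PySem.Chars.lower, List.mem_append, List.mem_cons, List.mem_map] at hmem
  have hmemp : ∀ x : Char, x ∈ a :: k ∨ x ∈ w ++ [b] → x ∈ p := by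
    intro x hx
    apply pv_mem_strip p x
    rw [← hsp]
    rcases hx with h | h
    · exact List.mem_append.mpr (Or.inl h)
    · rcases List.mem_append.mp h with h1 | h1
      · exact List.mem_append.mpr (Or.inr (List.mem_cons_of_mem _
          (List.mem_append.mpr (Or.inl h1))))
      · exact List.mem_append.mpr (Or.inr (List.mem_cons_of_mem _
          (List.mem_append.mpr (Or.inr h1))))
  rcases hmem with ⟨d, hd, hde⟩ | hsp2 | ⟨d, hd, hde⟩
  · have : d = '|' := pv_lowerChar_eq d '|' (by rw [pv_pipe_toNat]; omega) hde
    subst this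
    exact hp (hmemp '|' (Or.inl (List.mem_of_mem_filter hd)))
  · exact absurd hsp2 (by decide)
  · have : d = '|' := pv_lowerChar_eq d '|' (by rw [pv_pipe_toNat]; omega) hde
    subst this
    exact hp (hmemp '|' (Or.inr (List.mem_of_mem_filter hd)))

lemma pv_norm_has_space (p : List Char) : ' ' ∈ pvNorm p := by
  unfold pvNorm
  simp

lemma pv_first_fold (P : List (List Char)) (acc : List (List Char)) :
    P.foldl (fun acc pair =>
      let parts := PySem.Chars.splitOnMax (PySem.Chars.strip pair) [' '] 1
      if parts.length = 2 then
        acc ++ [PySem.Chars.lower (PySem.Chars.replace (parts[0]!) [' '] []) ++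
                ' ' :: PySem.Chars.lower (PySem.Chars.replace (parts[1]!) [' '] [])]
      else acc) acc = acc ++ (P.filter pvCond).map pvNorm := by
  rw [← PySem.List.foldl_append_if pvCond pvNorm P acc]
  apply PySem.List.foldl_congr_mem
  intro acc' x _
  by_cases h : (PySem.Chars.splitOnMax (PySem.Chars.strip x) [' '] 1).length = 2
  · simp [pvCond, pvNorm, h]
  · simp [pvCond, h]

lemma pv_alt_fold (P : List (List Char)) (acc : List (List Char)) :
    P.foldl (fun acc pair =>
      let parts := PySem.Chars.splitOnMax (PySem.Chars.strip pair) [' '] 1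
      if parts.length = 2 then
        let key := PySem.Chars.lower (PySem.Chars.replace (parts[0]!) [' '] [])
        let value0 := PySem.Chars.lower (PySem.Chars.replace (parts[1]!) [' '] [])
        let value := if value0 = ['?'] then ['-'] else value0
        acc ++ [key ++ ' ' :: value]
      else acc) acc = acc ++ (P.filter pvCond).map pvNormQ := by
  rw [← PySem.List.foldl_append_if pvCond pvNormQ P acc]
  apply PySem.List.foldl_congr_mem
  intro acc' x _
  by_cases h : (PySem.Chars.splitOnMax (PySem.Chars.strip x) [' '] 1).length = 2
  · simp [pvCond, pvNormQ, h]
  · simp [pvCond, h]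

lemma pv_fix_eq (s : List Char) :
    fix_spec_format_chars s =
      PySem.Chars.join ['|'] (((PySem.Chars.splitOn s ['|']).filter pvCond).map pvNorm) := by
  unfold fix_spec_format_chars
  by_cases hs : s.isEmpty
  · rw [if_pos hs]
    rw [List.isEmpty_iff] at hs
    subst hs
    decide
  · rw [if_neg hs]
    show PySem.Chars.join ['|'] ((PySem.Chars.splitOn s ['|']).foldl _ []) = _
    rw [pv_first_fold]
    simp

lemma pv_alt_eq (s : List Char) (hs : ¬ s.isEmpty = true) :
    clean_missing_values_alt_chars s =
      PySem.Chars.join ['|'] (((PySem.Chars.splitOn s ['|']).filter pvCond).map pvNormQ) := by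
  unfold clean_missing_values_alt_chars
  rw [if_neg hs]
  show PySem.Chars.join ['|'] ((PySem.Chars.splitOn s ['|']).foldl _ []) = _
  rw [pv_alt_fold]
  simp

lemma pv_second_body (e : List Char) (hg : pvGood e) (acc : List (List Char)) :
    (let part := PySem.Chars.strip e
     if part.isEmpty then acc
     else
       let key_value := PySem.Chars.splitOnMax part [' '] 1
       if key_value.length ≠ 2 then acc
       else
         let key := key_value[0]!
         let value := key_value[1]!
         let value := if value = ['?'] then ['-'] else value
         acc ++ [key ++ ' ' :: value]) = acc ++ [pvQ e] := by
  obtain ⟨a, b, k, w, he, ha, hb, hk, hv⟩ := hg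
  subst he
  have hassoc : (a :: k) ++ ' ' :: (w ++ [b]) = a :: (k ++ ' ' :: w) ++ [b] := by simp
  have hstrip : PySem.Chars.strip ((a :: k) ++ ' ' :: (w ++ [b])) =
      (a :: k) ++ ' ' :: (w ++ [b]) := by
    rw [hassoc]
    exact pv_strip_id a b (k ++ ' ' :: w) ha hb
  obtain ⟨ht, hdr⟩ := pv_take_drop_split (a :: k) (w ++ [b]) hk
  have hsm : PySem.Chars.splitOnMax ((a :: k) ++ ' ' :: (w ++ [b])) [' '] 1 =
      [a :: k, w ++ [b]] := by
    rw [pv_splitOnMax_space_one]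
    rw [if_pos (by simp)]
    rw [ht, hdr]
    simp
  show (let part := PySem.Chars.strip ((a :: k) ++ ' ' :: (w ++ [b]))
        if part.isEmpty then acc
        else
          let key_value := PySem.Chars.splitOnMax part [' '] 1
          if key_value.length ≠ 2 then acc
          else
            let key := key_value[0]!
            let value := key_value[1]!
            let value := if value = ['?'] then ['-'] else value
            acc ++ [key ++ ' ' :: value]) = acc ++ [pvQ ((a :: k) ++ ' ' :: (w ++ [b]))]
  rw [hstrip]
  have hsm' : PySem.Chars.splitOnMax (a :: (k ++ ' ' :: (w ++ [b]))) [' '] 1 =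
      [a :: k, w ++ [b]] := by simpa using hsm
  have ht' : List.takeWhile (fun x => decide (x ≠ ' ')) (a :: (k ++ ' ' :: (w ++ [b]))) =
      a :: k := by simpa using ht
  have hdr' : List.dropWhile (fun x => decide (x ≠ ' ')) (a :: (k ++ ' ' :: (w ++ [b]))) =
      ' ' :: (w ++ [b]) := by simpa using hdr
  simp only [decide_not] at ht' hdr'
  simp [hsm', pvQ, ht', hdr']

lemma pv_join_ne (x : List Char) (xs : List (List Char)) (hx : x ≠ []) :
    PySem.Chars.join ['|'] (x :: xs) ≠ [] := by
  cases xs with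
  | nil => rw [PySem.Chars.join_singleton]; exact hx
  | cons y ys =>
    rw [PySem.Chars.join_cons_cons]
    simp

lemma pv_chars_equiv (s : List Char) :
    clean_missing_values_chars s = clean_missing_values_alt_chars s := by
  by_cases hs : s.isEmpty = true
  · rw [List.isEmpty_iff] at hs
    subst hs
    decide
  · unfold clean_missing_values_chars
    rw [pv_fix_eq, pv_alt_eq s hs]
    cases hF : ((PySem.Chars.splitOn s ['|']).filter pvCond) with
    | nil => simp [PySem.Chars.join_nil]
    | cons e F' =>
      have hcond : ∀ p ∈ e :: F', pvCond p = true := by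
        intro p hp
        rw [← hF] at hp
        exact List.of_mem_filter hp
      have hNormNe : pvNorm e ≠ [] := by
        intro h
        have := pv_norm_has_space e
        rw [h] at this
        simp at this
      have hne : ¬ (PySem.Chars.join ['|'] ((e :: F').map pvNorm)).isEmpty = true := by
        intro h
        rw [List.isEmpty_iff] at h
        exact pv_join_ne (pvNorm e) (F'.map pvNorm) hNormNe (by simpa using h)
      rw [if_neg hne]
      have hmem : ∀ l ∈ (e :: F').map pvNorm, '|' ∉ l := by
        intro l hl
        obtain ⟨p, hp, rfl⟩ := List.mem_map.mp hl
        have hp' : p ∈ (PySem.Chars.splitOn s ['|']).filter pvCond := by rw [hF]; exact hp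
        exact pv_pipe_not_mem_norm p (List.of_mem_filter hp')
          (pv_pipe_not_mem_split s p (List.mem_of_mem_filter hp'))
      have hsplitN : PySem.Chars.splitOn (PySem.Chars.join ['|'] ((e :: F').map pvNorm)) ['|'] =
          (e :: F').map pvNorm := by
        rw [pv_splitOn_single]
        have hJ : PySem.Chars.join ['|'] ((e :: F').map pvNorm) =
            ['|'].intercalate ((e :: F').map pvNorm) := by rfl
        rw [hJ]
        exact List.splitOn_intercalate _ '|' hmem (by simp)
      rw [hsplitN]
      show PySem.Chars.join ['|'] (((e :: F').map pvNorm).foldl (fun acc part0 =>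
            let part := PySem.Chars.strip part0
            if part.isEmpty then acc
            else
              let key_value := PySem.Chars.splitOnMax part [' '] 1
              if key_value.length ≠ 2 then acc
              else
                let key := key_value[0]!
                let value := key_value[1]!
                let value := if value = ['?'] then ['-'] else value
                acc ++ [key ++ ' ' :: value]) [])
          = PySem.Chars.join ['|'] ((e :: F').map pvNormQ)
      have hgood : ∀ (acc : List (List Char)), ∀ x ∈ (e :: F').map pvNorm,
          (fun acc part0 =>
            let part := PySem.Chars.strip part0
            if part.isEmpty then acc
            else
              let key_value := PySem.Chars.splitOnMax part [' '] 1
              if key_value.length ≠ 2 then acc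
              else
                let key := key_value[0]!
                let value := key_value[1]!
                let value := if value = ['?'] then ['-'] else value
                acc ++ [key ++ ' ' :: value]) acc x = acc ++ [pvQ x] := by
        intro acc x hx
        obtain ⟨p, hp, rfl⟩ := List.mem_map.mp hx
        exact pv_second_body (pvNorm p) (pv_norm_good_q p (hcond p hp)).1 acc
      rw [PySem.List.foldl_congr_mem ((e :: F').map pvNorm) _ (fun acc x => acc ++ [pvQ x]) [] hgood]
      rw [PySem.List.foldl_append_singleton_eq_map]
      rw [List.nil_append, List.map_map]
      apply congrArg
      apply List.map_congr_left
      intro p hp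
      exact (pv_norm_good_q p (hcond p hp)).2

-- ===== VERDICT (by name: the statement is the Claim_ definition above) =====
theorem clean_missing_values_spec : Claim_equal_clean_missing_values := by
  intro s _
  unfold Spec_clean_missing_values clean_missing_values clean_missing_values_alt
  rw [pv_chars_equiv]
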